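-- pv_equiv track=rewrite | github.com/chauthehan/RECOGNIZE_ID_CARD | tools/score.py | score_Gioitinh
-- ===== SOURCE A (Python) =====
-- def score_Gioitinh(key):
--     key = key[:11]
--     s = 0
--     for i in {'Gi', 'io','oi', 'i ', ' t', 'ti', 'in', 'nh', 'h:'}:
--         if key.find(i) != -1:
--             s = s+1
--     for i in {'Gio', 'ioi', 'oi ', 'i t', ' ti', 'tin', 'inh', 'nh:'}:
--         if key.find(i) != -1:
--             s = s+3
--     for i in {'Gioi', 'ioi ','oi t', 'i ti', ' tin', 'tinh', 'inh:'}: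
--         if key.find(i) != -1:
--             s = s+5
--     return s
-- ===== SOURCE B (Python) =====
-- WEIGHT = {'Gi': 1, 'io': 1, 'oi': 1, 'i ': 1, ' t': 1, 'ti': 1, 'in': 1, 'nh': 1, 'h:': 1,
--           'Gio': 3, 'ioi': 3, 'oi ': 3, 'i t': 3, ' ti': 3, 'tin': 3, 'inh': 3, 'nh:': 3,
--           'Gioi': 5, 'ioi ': 5, 'oi t': 5, 'i ti': 5, ' tin': 5, 'tinh': 5, 'inh:': 5}
--
--
-- def score_Gioitinh(key):
--     key = key[:11]
--     found = set()
--     for i in range(len(key)):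
--         for n in (2, 3, 4):
--             w = key[i:i + n]
--             if w in WEIGHT:
--                 found.add(w)
--     return sum(WEIGHT[w] for w in found)
-- ===== Notes on version B (the rewrite author's own statement) =====
-- stated objective: alternative
-- what changed: Instead of running a substring search over the key once per each of the 24 fixed n-grams, B scans the key's own windows of length 2/3/4 once, collects those that are keys of a precomputed weight dictionary into a set, and sums the weights of the found set.
import Mathlib
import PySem

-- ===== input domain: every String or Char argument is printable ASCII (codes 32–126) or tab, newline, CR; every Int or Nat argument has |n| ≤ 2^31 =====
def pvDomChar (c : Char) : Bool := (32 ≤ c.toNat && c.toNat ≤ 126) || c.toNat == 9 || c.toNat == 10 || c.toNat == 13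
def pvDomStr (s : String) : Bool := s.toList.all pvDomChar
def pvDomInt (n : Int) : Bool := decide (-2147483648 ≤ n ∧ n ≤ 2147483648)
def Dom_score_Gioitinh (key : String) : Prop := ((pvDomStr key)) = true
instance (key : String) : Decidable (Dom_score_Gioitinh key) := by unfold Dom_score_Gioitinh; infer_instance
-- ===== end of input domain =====

-- B replaces A's 24 per-n-gram substring searches by one scan of the key's own length-2/3/4
-- windows looked up in a precomputed weight dictionary, summing the weights of the found set.

-- ===== PORT A =====
-- the three Python set literals (distinct elements; the loop body is order-independent, so the
-- written order is a faithful iteration order for the set)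
def pvG2 : List (List Char) := [['G', 'i'], ['i', 'o'], ['o', 'i'], ['i', ' '], [' ', 't'], ['t', 'i'], ['i', 'n'], ['n', 'h'], ['h', ':']]
def pvG3 : List (List Char) := [['G', 'i', 'o'], ['i', 'o', 'i'], ['o', 'i', ' '], ['i', ' ', 't'], [' ', 't', 'i'], ['t', 'i', 'n'], ['i', 'n', 'h'], ['n', 'h', ':']]
def pvG4 : List (List Char) := [['G', 'i', 'o', 'i'], ['i', 'o', 'i', ' '], ['o', 'i', ' ', 't'], ['i', ' ', 't', 'i'], [' ', 't', 'i', 'n'], ['t', 'i', 'n', 'h'], ['i', 'n', 'h', ':']]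

def score_Gioitinh (key : String) : Int :=
  let k : List Char := PySem.List.slice key.toList none (some 11)   -- key = key[:11]
  let s : Int := 0
  let s := pvG2.foldl (fun s i => if PySem.Chars.find k i ≠ -1 then s + 1 else s) s
  let s := pvG3.foldl (fun s i => if PySem.Chars.find k i ≠ -1 then s + 3 else s) s
  let s := pvG4.foldl (fun s i => if PySem.Chars.find k i ≠ -1 then s + 5 else s) s
  s

-- ===== PORT B =====
-- WEIGHT, the module-level dict of Source B (string keys modelled as their code-point lists)
def pvGrams : PySem.Dict (List Char) Int := PySem.Dict.ofList [(['G', 'i'], 1), (['i', 'o'], 1), (['o', 'i'], 1), (['i', ' '], 1), ([' ', 't'], 1), (['t', 'i'], 1), (['i', 'n'], 1), (['n', 'h'], 1), (['h', ':'], 1),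
  (['G', 'i', 'o'], 3), (['i', 'o', 'i'], 3), (['o', 'i', ' '], 3), (['i', ' ', 't'], 3), ([' ', 't', 'i'], 3), (['t', 'i', 'n'], 3), (['i', 'n', 'h'], 3), (['n', 'h', ':'], 3),
  (['G', 'i', 'o', 'i'], 5), (['i', 'o', 'i', ' '], 5), (['o', 'i', ' ', 't'], 5), (['i', ' ', 't', 'i'], 5), ([' ', 't', 'i', 'n'], 5), (['t', 'i', 'n', 'h'], 5), (['i', 'n', 'h', ':'], 5)]

-- the inner loop of Source B: for n in (2,3,4): w = key[i:i+n]; if w in WEIGHT: found.add(w)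
def pvInner (k : List Char) (i : Int) (acc : PySem.Set (List Char)) : PySem.Set (List Char) :=
  ([2, 3, 4] : List Int).foldl (fun acc n =>
    if pvGrams.contains (PySem.List.slice k (some i) (some (i + n))) then
      PySem.Set.add acc (PySem.List.slice k (some i) (some (i + n)))
    else acc) acc

-- the outer loop of Source B building 'found'
def pvWindows (k : List Char) : PySem.Set (List Char) :=
  (PySem.List.pyRange 0 (k.length : Int) 1).foldl (fun acc i => pvInner k i acc)
    PySem.Set.empty

def score_Gioitinh_alt (key : String) : Int :=
  let k : List Char := PySem.List.slice key.toList none (some 11)   -- key = key[:11]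
  let found := pvWindows k
  found.foldl (fun s w => s + pvGrams.getD w 0) 0   -- sum(WEIGHT[w] for w in found)

-- ===== PRECONDITION & SPEC =====
def Spec_score_Gioitinh (key : String) (out : Int) : Prop := out = score_Gioitinh_alt key
instance (key : String) (out : Int) : Decidable (Spec_score_Gioitinh key out) := by unfold Spec_score_Gioitinh; infer_instance

-- ===== CLAIM (what is proved, stated in full; the proofs are below) =====
def Claim_equal_score_Gioitinh : Prop := ∀ (key : String), Dom_score_Gioitinh key → Spec_score_Gioitinh key (score_Gioitinh key)

-- ===== LEMMAS AND PROOFS =====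

-- membership in a "conditionally add" set fold
theorem pv_mem_foldl_addIf {β : Type} (l : List β) (f : β → List Char) (C : List Char → Bool)
    (acc : PySem.Set (List Char)) (w : List Char) :
    (w ∈ l.foldl (fun s b => if C (f b) then PySem.Set.add s (f b) else s) acc) ↔
      (w ∈ acc ∨ (C w = true ∧ ∃ b ∈ l, w = f b)) := by
  induction l generalizing acc with
  | nil => simp
  | cons b t ih =>
    simp only [List.foldl_cons]
    by_cases hC : C (f b) = true
    · rw [hC]
      simp only [if_true, ih, PySem.Set.mem_add, List.mem_cons]
      constructor
      · rintro ((h | rfl) | ⟨hc, b', hb', rfl⟩)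
        · exact Or.inl h
        · exact Or.inr ⟨hC, b, Or.inl rfl, rfl⟩
        · exact Or.inr ⟨hc, b', Or.inr hb', rfl⟩
      · rintro (h | ⟨hc, b', (rfl | hb'), rfl⟩)
        · exact Or.inl (Or.inl h)
        · exact Or.inl (Or.inr rfl)
        · exact Or.inr ⟨hc, b', hb', rfl⟩
    · rw [if_neg hC]
      simp only [ih, List.mem_cons]
      constructor
      · rintro (h | ⟨hc, b', hb', rfl⟩)
        · exact Or.inl h
        · exact Or.inr ⟨hc, b', Or.inr hb', rfl⟩
      · rintro (h | ⟨hc, b', (rfl | hb'), rfl⟩)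
        · exact Or.inl h
        · exact absurd hc hC
        · exact Or.inr ⟨hc, b', hb', rfl⟩

-- nodup is preserved by the "conditionally add" fold
theorem pv_nodup_foldl_addIf {β : Type} (l : List β) (f : β → List Char) (C : List Char → Bool)
    (acc : PySem.Set (List Char)) (h : acc.Nodup) :
    (l.foldl (fun s b => if C (f b) then PySem.Set.add s (f b) else s) acc).Nodup := by
  induction l generalizing acc with
  | nil => exact h
  | cons b t ih =>
    simp only [List.foldl_cons]
    split
    · exact ih _ (PySem.Set.nodup_add _ _ h)
    · exact ih _ h

-- the members of the inner fold
theorem pv_mem_pvInner (k : List Char) (i : Int) (acc : PySem.Set (List Char)) (w : List Char) :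
    w ∈ pvInner k i acc ↔ (w ∈ acc ∨ (pvGrams.contains w = true ∧
      ∃ n ∈ ([2, 3, 4] : List Int), w = PySem.List.slice k (some i) (some (i + n)))) :=
  pv_mem_foldl_addIf ([2, 3, 4] : List Int)
    (fun n => PySem.List.slice k (some i) (some (i + n))) (fun w => pvGrams.contains w) acc w

theorem pv_nodup_pvInner (k : List Char) (i : Int) (acc : PySem.Set (List Char))
    (h : acc.Nodup) : (pvInner k i acc).Nodup :=
  pv_nodup_foldl_addIf ([2, 3, 4] : List Int)
    (fun n => PySem.List.slice k (some i) (some (i + n))) (fun w => pvGrams.contains w) acc h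

-- the members of pvWindows k
theorem pv_mem_pvWindows (k w : List Char) :
    w ∈ pvWindows k ↔ pvGrams.contains w = true ∧
      ∃ i, (0 ≤ i ∧ i < (k.length : Int)) ∧ ∃ n, n ∈ ([2, 3, 4] : List Int) ∧
        w = PySem.List.slice k (some i) (some (i + n)) := by
  unfold pvWindows
  have hstep : ∀ (l : List Int) (acc : PySem.Set (List Char)),
      (w ∈ l.foldl (fun acc i => pvInner k i acc) acc) ↔
      (w ∈ acc ∨ (pvGrams.contains w = true ∧ ∃ i ∈ l, ∃ n ∈ ([2, 3, 4] : List Int),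
        w = PySem.List.slice k (some i) (some (i + n)))) := by
    intro l
    induction l with
    | nil => simp
    | cons a t ih =>
      intro acc
      rw [List.foldl_cons, ih, pv_mem_pvInner]
      constructor
      · rintro ((h | ⟨hc, n, hn, rfl⟩) | ⟨hc, i, hi, n, hn, rfl⟩)
        · exact Or.inl h
        · exact Or.inr ⟨hc, a, List.mem_cons_self, n, hn, rfl⟩
        · exact Or.inr ⟨hc, i, List.mem_cons_of_mem a hi, n, hn, rfl⟩
      · rintro (h | ⟨hc, i, hi, n, hn, rfl⟩)
        · exact Or.inl (Or.inl h)
        · rcases List.mem_cons.mp hi with rfl | hi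
          · exact Or.inl (Or.inr ⟨hc, n, hn, rfl⟩)
          · exact Or.inr ⟨hc, i, hi, n, hn, rfl⟩
  rw [hstep]
  simp only [PySem.Set.empty, List.not_mem_nil, false_or, PySem.List.mem_pyRange_one]

theorem pv_nodup_pvWindows (k : List Char) : (pvWindows k).Nodup := by
  unfold pvWindows
  generalize PySem.List.pyRange 0 (k.length : Int) 1 = l
  have h : ∀ (l' : List Int) (acc : PySem.Set (List Char)), acc.Nodup →
      (l'.foldl (fun acc i => pvInner k i acc) acc).Nodup := by
    intro l'
    induction l' with
    | nil => exact fun _ h => h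
    | cons a t ih =>
      intro acc hacc
      rw [List.foldl_cons]
      exact ih _ (pv_nodup_pvInner k a acc hacc)
  exact h l _ List.nodup_nil

-- a window in the found set is an infix; an infix of matching length is a window
theorem pv_mem_found_iff (k g : List Char) (hc : pvGrams.contains g = true)
    (hlen : (g.length : Int) ∈ ([2, 3, 4] : List Int)) :
    (g ∈ pvWindows k) ↔ g <:+: k := by
  rw [pv_mem_pvWindows]
  constructor
  · rintro ⟨-, i, ⟨hi0, hilen⟩, n, hn, rfl⟩
    have hn0 : 0 ≤ n := by
      simp only [List.mem_cons, List.not_mem_nil, or_false] at hn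
      rcases hn with rfl | rfl | rfl <;> norm_num
    rw [PySem.List.slice_toNat k hi0 (by omega)]
    calc ((k.drop i.toNat).take ((i + n).toNat - i.toNat)) <:+: k.drop i.toNat :=
          (List.take_prefix _ _).isInfix
      _ <:+: k := (List.drop_suffix _ _).isInfix
  · rintro ⟨s, t, rfl⟩
    have hg : g ≠ [] := by
      intro h
      rw [h] at hlen
      simp at hlen
    refine ⟨hc, (s.length : Int), ⟨by positivity, ?_⟩, (g.length : Int), hlen, ?_⟩
    · have : 0 < g.length := List.length_pos_iff.mpr hg
      simp only [List.length_append]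
      push_cast
      omega
    · rw [PySem.List.slice_natCast_add]
      rw [List.append_assoc, List.drop_left, List.take_left]

-- s + Σ form of a "conditionally += w" fold
theorem pv_foldl_if_add {β : Type} (l : List β) (p : β → Prop) [DecidablePred p]
    (wt : β → Int) (s0 : Int) :
    l.foldl (fun s g => if p g then s + wt g else s) s0 =
      s0 + (l.map (fun g => if p g then wt g else 0)).sum := by
  induction l generalizing s0 with
  | nil => simp
  | cons b t ih =>
    simp only [List.foldl_cons, List.map_cons, List.sum_cons, ih]
    split <;> ring

theorem pv_foldl_add_eq_sum_map (l : List (List Char)) (wt : List Char → Int) :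
    l.foldl (fun s w => s + wt w) 0 = (l.map wt).sum := by
  induction l using List.reverseRecOn with
  | nil => rfl
  | append_singleton t b ih => simp [ih]

theorem pv_sum_map_filter (l : List (List Char)) (p : List Char → Prop) [DecidablePred p]
    (f : List Char → Int) :
    ((l.filter (fun x => decide (p x))).map f).sum =
      (l.map (fun x => if p x then f x else 0)).sum := by
  induction l with
  | nil => rfl
  | cons b t ih =>
    by_cases h : p b <;> simp [h, ih]

-- ===== VERDICT (by name: the statement is the Claim_ definition above) =====
theorem score_Gioitinh_spec : Claim_equal_score_Gioitinh := by
  intro key _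
  unfold Spec_score_Gioitinh
  simp only [score_Gioitinh, score_Gioitinh_alt]
  set k : List Char := PySem.List.slice key.toList none (some 11) with hk
  -- B side: sum over found = sum over the filtered key list
  have hsub : ∀ w ∈ pvWindows k, w ∈ pvG2 ++ pvG3 ++ pvG4 := by
    intro w hw
    have hc := ((pv_mem_pvWindows k w).mp hw).1
    have hkeys : pvGrams.keys = pvG2 ++ pvG3 ++ pvG4 := by decide
    rw [PySem.Dict.contains_iff_mem_keys, hkeys] at hc
    exact hc
  have hperm : List.Perm (pvWindows k) ((pvG2 ++ pvG3 ++ pvG4).filter (fun g => decide (g ∈ pvWindows k))) := by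
    rw [List.perm_ext_iff_of_nodup (pv_nodup_pvWindows k)
      (List.Nodup.filter _ (by decide))]
    intro a
    simp only [List.mem_filter, decide_eq_true_eq]
    exact ⟨fun h => ⟨hsub a h, h⟩, fun h => h.2⟩
  rw [pv_foldl_add_eq_sum_map, (hperm.map _).sum_eq,
    pv_sum_map_filter _ (fun g => g ∈ pvWindows k) (fun w => pvGrams.getD w 0)]
  -- A side: folds to sums
  rw [pv_foldl_if_add pvG2 (fun g => PySem.Chars.find k g ≠ -1) (fun _ => 1) 0,
    pv_foldl_if_add pvG3 (fun g => PySem.Chars.find k g ≠ -1) (fun _ => 3),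
    pv_foldl_if_add pvG4 (fun g => PySem.Chars.find k g ≠ -1) (fun _ => 5)]
  simp only [List.append_assoc, List.map_append, List.sum_append, zero_add]
  -- match the three groups term by term
  have hgroup : ∀ (l : List (List Char)) (c : Int),
      (∀ g ∈ l, pvGrams.getD g 0 = c ∧ pvGrams.contains g = true ∧
        (g.length : Int) ∈ ([2, 3, 4] : List Int)) →
      (l.map (fun g => if g ∈ pvWindows k then pvGrams.getD g 0 else 0)).sum =
        (l.map (fun g => if PySem.Chars.find k g ≠ -1 then c else 0)).sum := by
    intro l c hl
    congr 1
    apply List.map_congr_left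
    intro g hg
    obtain ⟨hw, hc, hlen⟩ := hl g hg
    rw [hw, if_congr ((pv_mem_found_iff k g hc hlen).trans
      (PySem.Chars.find_ne_neg_one_iff k g).symm) rfl rfl]
  rw [hgroup pvG2 1 (by decide), hgroup pvG3 3 (by decide), hgroup pvG4 5 (by decide)]
  ring
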